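-- pv_equiv track=rewrite | github.com/code4fukui/meta-ops | src/ops/fix_flagged_upstream_first_v17.py | ensure_top_link
-- ===== SOURCE A (Python) =====
-- def cleanup_blank(lines):
--     out_lines = []
--     prev_blank = False
--     for ln in lines:
--         blank = ln.strip() == ''
--         if blank and prev_blank:
--             continue
--         out_lines.append(ln)
--         prev_blank = blank
--     while out_lines and out_lines[-1].strip() == '':
--         out_lines.pop()
--     return out_lines
--
-- def find_first_h1(lines):
--     for i, ln in enumerate(lines):
--         if ln.strip().startswith('# '):
--             return i
--     return -1
--
-- def ensure_top_link(lines, link_line):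
--     # Remove all occurrences including quoted forms.
--     stripped = []
--     for ln in lines:
--         s = ln.strip()
--         if s == link_line or s == f'> {link_line}':
--             continue
--         stripped.append(ln)
--     lines = stripped
--
--     i = find_first_h1(lines)
--     if i < 0:
--         lines = [link_line, ''] + lines
--         return cleanup_blank(lines)
--
--     insert_at = i + 1
--     if insert_at < len(lines) and lines[insert_at].strip() != '':
--         lines.insert(insert_at, '')
--         insert_at += 1
--     lines.insert(insert_at, link_line)
--     if insert_at + 1 < len(lines) and lines[insert_at + 1].strip() != '':
--         lines.insert(insert_at + 1, '')
--     return cleanup_blank(lines)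
-- ===== SOURCE B (Python) =====
-- def ensure_top_link(lines, link_line):
--     def is_link(ln):
--         s = ln.strip()
--         return s == link_line or s == '> ' + link_line
--
--     # Pass 1 (backward): drop link duplicates while locating the topmost H1.
--     # kept_rev holds the surviving lines in reverse; cut remembers how many
--     # surviving lines sit below the topmost '# ' heading.
--     kept_rev, cut = [], None
--     for ln in reversed(lines):
--         if is_link(ln):
--             continue
--         if ln.strip().startswith('# '):
--             cut = len(kept_rev)
--         kept_rev.append(ln)
--
--     if cut is None:
--         doc = [link_line, ''] + kept_rev[::-1]
--     else:
--         head = kept_rev[cut:][::-1]   # up to and including the topmost H1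
--         tail = kept_rev[:cut][::-1]   # everything after it
--         if tail and tail[0].strip() != '':
--             doc = head + ['', link_line, ''] + tail
--         else:
--             doc = head + [link_line] + tail
--
--     # Pass 2 (backward): normalize blanks back-to-front; a blank survives only
--     # if something already survived below it, and only as first of its run.
--     out_rev = []
--     for ln in reversed(doc):
--         if ln.strip() == '':
--             if out_rev and out_rev[-1].strip() != '':
--                 out_rev.append(ln)
--             elif out_rev:
--                 out_rev[-1] = ln
--         else:
--             out_rev.append(ln)
--     return out_rev[::-1]
-- ===== Notes on version B (the rewrite author's own statement) =====
-- stated objective: alternative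
-- what changed: B builds the result back-to-front in two backward passes: one reversed scan fuses link-duplicate removal with locating the topmost H1 (no index search, no insert()), and a second reversed scan normalizes blanks with a replace-or-append state machine (a blank survives only if something already survived below it), replacing A's forward filter + find_first_h1 + conditional index-arithmetic inserts + prev_blank collapse + trailing-pop loop.
import Mathlib
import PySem

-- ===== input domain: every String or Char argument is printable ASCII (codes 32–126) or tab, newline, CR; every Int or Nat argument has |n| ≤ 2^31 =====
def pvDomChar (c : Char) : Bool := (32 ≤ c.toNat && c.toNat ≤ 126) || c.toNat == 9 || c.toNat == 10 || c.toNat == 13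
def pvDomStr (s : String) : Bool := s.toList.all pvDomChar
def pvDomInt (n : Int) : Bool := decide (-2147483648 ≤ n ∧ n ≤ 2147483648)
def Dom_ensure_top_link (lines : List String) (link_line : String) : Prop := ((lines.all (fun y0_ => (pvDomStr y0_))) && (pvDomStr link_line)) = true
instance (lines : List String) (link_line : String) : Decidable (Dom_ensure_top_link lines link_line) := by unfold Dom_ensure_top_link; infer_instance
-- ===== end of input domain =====

-- B builds the result back-to-front: one reversed pass fuses link-removal with locating the
-- topmost H1 (no index search, no insert()), a second reversed pass normalizes blanks with a
-- replace-or-append state machine; objective: alternative.  Return-value equivalence (A mutates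
-- only lists it built locally, so callers observe no mutation).

-- ===== PORT A =====
-- while out and out[-1].strip() == '': out.pop()
def pvPopTrailA : List String → List String
  | [] => []
  | x :: xs =>
    if PySem.Str.strip ((x :: xs).getLast (by simp)) == "" then
      pvPopTrailA (x :: xs).dropLast
    else x :: xs
termination_by l => l.length
decreasing_by simp

def cleanup_blank_A (lines : List String) : List String :=
  pvPopTrailA (lines.foldl (fun (st : List String × Bool) ln =>
    let blank := PySem.Str.strip ln == ""
    if blank && st.2 then st else (st.1 ++ [ln], blank)) ([], false)).1

def pvFindH1A : List String → Int → Int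
  | [], _ => -1
  | ln :: rest, i =>
    if PySem.Str.startswith (PySem.Str.strip ln) "# " then i else pvFindH1A rest (i + 1)

def ensure_top_link (lines : List String) (link_line : String) : List String :=
  let stripped := lines.foldl (fun acc ln =>
    let s := PySem.Str.strip ln
    if s == link_line || s == "> " ++ link_line then acc else acc ++ [ln]) []
  let i := pvFindH1A stripped 0
  if i < 0 then cleanup_blank_A ([link_line, ""] ++ stripped)
  else
    let insert_at := i + 1
    -- guards `insert_at < len(lines)` ensure the indexings are in range, so `.getD ""` is never used
    let st :=
      if insert_at < (stripped.length : Int) ∧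
         PySem.Str.strip ((PySem.List.pyGet? stripped insert_at).getD "") ≠ "" then
        (PySem.List.insert stripped insert_at "", insert_at + 1)
      else (stripped, insert_at)
    let lines2 := PySem.List.insert st.1 st.2 link_line
    let lines3 :=
      if st.2 + 1 < (lines2.length : Int) ∧
         PySem.Str.strip ((PySem.List.pyGet? lines2 (st.2 + 1)).getD "") ≠ "" then
        PySem.List.insert lines2 (st.2 + 1) ""
      else lines2
    cleanup_blank_A lines3

-- ===== PORT B =====
def pvIsLinkB (link ln : String) : Bool :=
  PySem.Str.strip ln == link || PySem.Str.strip ln == "> " ++ link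

-- pass 1: `for ln in reversed(lines)`, appending survivors to kept_rev and
-- remembering in `cut` how many survivors sit below the topmost H1
def pvPass1B (link : String) (lines : List String) : List String × Option Nat :=
  lines.reverse.foldl (fun (st : List String × Option Nat) ln =>
    if pvIsLinkB link ln then st
    else if PySem.Str.startswith (PySem.Str.strip ln) "# " then (st.1 ++ [ln], some st.1.length)
    else (st.1 ++ [ln], st.2)) ([], none)

-- pass 2 body: blank lines are dropped (nothing below), overwrite a blank below, or appended
def pvNormStepB (acc : List String) (ln : String) : List String :=
  if PySem.Str.strip ln == "" then
    if acc.getLast?.elim false (fun a => !(PySem.Str.strip a == "")) then acc ++ [ln]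
    else if acc.isEmpty then acc
    else acc.dropLast ++ [ln]
  else acc ++ [ln]

def ensure_top_link_alt (lines : List String) (link_line : String) : List String :=
  let st := pvPass1B link_line lines
  let doc :=
    match st.2 with
    | none => [link_line, ""] ++ st.1.reverse
    | some cut =>
      -- kept_rev[cut:][::-1] and kept_rev[:cut][::-1]: nonnegative slices = drop/take, [::-1] = reverse
      let head := (st.1.drop cut).reverse
      let tail := (st.1.take cut).reverse
      if (match tail with | [] => false | r0 :: _ => !(PySem.Str.strip r0 == "")) then
        head ++ ["", link_line, ""] ++ tail
      else head ++ [link_line] ++ tail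
  (doc.reverse.foldl pvNormStepB []).reverse

-- ===== PRECONDITION & SPEC =====
def Spec_ensure_top_link (lines : List String) (link_line : String) (out : List String) : Prop := out = ensure_top_link_alt lines link_line
instance (lines : List String) (link_line : String) (out : List String) : Decidable (Spec_ensure_top_link lines link_line out) := by unfold Spec_ensure_top_link; infer_instance

-- ===== CLAIM (what is proved, stated in full; the proofs are below) =====
def Claim_equal_ensure_top_link : Prop := ∀ (lines : List String) (link_line : String), Dom_ensure_top_link lines link_line → Spec_ensure_top_link lines link_line (ensure_top_link lines link_line)

-- ===== LEMMAS AND PROOFS =====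

-- reference dedup pass: flag = "the previously considered line is blank"
def pvDedup : List String → Bool → List String
  | [], _ => []
  | ln :: rest, p =>
    let b := PySem.Str.strip ln == ""
    if b && p then pvDedup rest p else ln :: pvDedup rest b

-- reference right-trim of trailing blanks
def pvTrimR : List String → List String
  | [] => []
  | x :: xs => if (pvTrimR xs).isEmpty && (PySem.Str.strip x == "") then [] else x :: pvTrimR xs

-- cons-state version of pass 2's step (acc in forward order)
def pvConsStep (out : List String) (ln : String) : List String :=
  if PySem.Str.strip ln == "" then
    match out with
    | [] => []
    | a :: tl => if !(PySem.Str.strip a == "") then ln :: a :: tl else ln :: tl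
  else ln :: out

def pvN (l : List String) : List String := l.foldr (fun ln acc => pvConsStep acc ln) []

theorem foldA_eq (l : List String) : ∀ (out : List String) (p : Bool),
    (l.foldl (fun (st : List String × Bool) ln =>
      let blank := PySem.Str.strip ln == ""
      if blank && st.2 then st else (st.1 ++ [ln], blank)) (out, p)).1 = out ++ pvDedup l p := by
  induction l with
  | nil => simp [pvDedup]
  | cons ln rest ih =>
    intro out p
    by_cases h : (PySem.Str.strip ln == "") && p
    · simp only [List.foldl_cons, pvDedup, h]
      simp only [if_true, ih]
    · simp only [List.foldl_cons, pvDedup]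
      simp only [h, if_false, Bool.false_eq_true, ih, List.append_assoc, List.singleton_append]

theorem trimR_concat_blank (b : String) (hb : (PySem.Str.strip b == "") = true) :
    ∀ ys : List String, pvTrimR (ys ++ [b]) = pvTrimR ys := by
  intro ys
  induction ys with
  | nil => simp [pvTrimR, hb]
  | cons y ys ih => simp only [List.cons_append, pvTrimR, ih]

theorem trimR_of_last_nonblank : ∀ (l : List String) (h : l ≠ []),
    (PySem.Str.strip (l.getLast h) == "") = false → pvTrimR l = l := by
  intro l
  induction l with
  | nil => intro h; exact absurd rfl h
  | cons x xs ih =>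
    intro _ hnb
    cases xs with
    | nil =>
      simp only [List.getLast_singleton] at hnb
      simp [pvTrimR, hnb]
    | cons y ys =>
      have h2 : (y :: ys) ≠ [] := by simp
      have heq := ih h2 (by rwa [List.getLast_cons h2] at hnb)
      rw [pvTrimR, heq]
      simp

theorem popTrail_eq_trimR (l : List String) : pvPopTrailA l = pvTrimR l := by
  induction l using pvPopTrailA.induct with
  | case1 => simp [pvPopTrailA, pvTrimR]
  | case2 x xs hblank ih =>
    rw [pvPopTrailA, if_pos hblank, ih]
    conv_rhs => rw [show x :: xs = (x :: xs).dropLast ++ [(x :: xs).getLast (by simp)] by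
      simp [List.dropLast_concat_getLast]]
    rw [trimR_concat_blank _ hblank]
  | case3 x xs hblank =>
    rw [pvPopTrailA, if_neg hblank]
    exact (trimR_of_last_nonblank (x :: xs) (by simp) (by simpa using hblank)).symm

theorem cleanupA_eq (l : List String) : cleanup_blank_A l = pvTrimR (pvDedup l false) := by
  unfold cleanup_blank_A
  rw [foldA_eq, popTrail_eq_trimR]
  simp

theorem trimR_getLast_nonblank : ∀ (l : List String) (z : String),
    (pvTrimR l).getLast? = some z → (PySem.Str.strip z == "") = false := by
  intro l
  induction l with
  | nil => intro z h; simp [pvTrimR] at h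
  | cons x xs ih =>
    intro z h
    rw [pvTrimR] at h
    by_cases hc : (pvTrimR xs).isEmpty && (PySem.Str.strip x == "")
    · rw [if_pos hc] at h; simp at h
    · rw [if_neg hc] at h
      cases he : pvTrimR xs with
      | nil =>
        rw [he] at h hc
        simp at h hc
        rw [← h]; simpa using hc
      | cons a tl =>
        rw [he] at h
        rw [List.getLast?_cons_cons] at h
        exact ih z (he ▸ h)
theorem TtTf (xs : List String) :
    pvTrimR (pvDedup xs true) =
      (match pvTrimR (pvDedup xs false) with
       | [] => []
       | a :: tl => if PySem.Str.strip a == "" then tl else a :: tl) := by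
  cases xs with
  | nil => rfl
  | cons x xs' =>
    by_cases hb : (PySem.Str.strip x == "") = true
    · have h1 : pvDedup (x :: xs') true = pvDedup xs' true := by
        simp [pvDedup, hb]
      have h2 : pvDedup (x :: xs') false = x :: pvDedup xs' true := by
        simp [pvDedup, hb]
      rw [h1, h2, pvTrimR]
      cases he : pvTrimR (pvDedup xs' true) with
      | nil => simp [hb]
      | cons a tl => simp [hb]
    · have hb' : (PySem.Str.strip x == "") = false := by simpa using hb
      have h1 : pvDedup (x :: xs') true = x :: pvDedup xs' false := by
        simp [pvDedup, hb']
      have h2 : pvDedup (x :: xs') false = x :: pvDedup xs' false := by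
        simp [pvDedup, hb']
      rw [h1, h2, pvTrimR]
      simp [hb']
theorem pvN_eq (l : List String) : pvN l = pvTrimR (pvDedup l false) := by
  induction l with
  | nil => rfl
  | cons x xs ih =>
    have hstep : pvN (x :: xs) = pvConsStep (pvN xs) x := rfl
    by_cases hb : (PySem.Str.strip x == "") = true
    · have h2 : pvDedup (x :: xs) false = x :: pvDedup xs true := by simp [pvDedup, hb]
      rw [hstep, ih, h2, pvTrimR]
      simp only [pvConsStep, hb, if_true]
      rw [TtTf]
      cases he : pvTrimR (pvDedup xs false) with
      | nil => simp
      | cons a tl =>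
        by_cases ha : (PySem.Str.strip a == "") = true
        · have htl : tl ≠ [] := by
            intro h0
            have hl : (pvTrimR (pvDedup xs false)).getLast? = some a := by simp [he, h0]
            have := trimR_getLast_nonblank _ _ hl
            rw [ha] at this; exact absurd this (by simp)
          simp [ha, htl, List.isEmpty_iff]
        · have ha' : (PySem.Str.strip a == "") = false := by simpa using ha
          simp [ha']
    · have hb' : (PySem.Str.strip x == "") = false := by simpa using hb
      have h2 : pvDedup (x :: xs) false = x :: pvDedup xs false := by simp [pvDedup, hb']
      rw [hstep, ih, h2, pvTrimR]
      simp only [pvConsStep, hb', Bool.false_eq_true, if_false]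
      cases he : pvTrimR (pvDedup xs false) with
      | nil => simp
      | cons a tl => simp
theorem normStep_rev (out : List String) (ln : String) :
    pvNormStepB out.reverse ln = (pvConsStep out ln).reverse := by
  unfold pvNormStepB pvConsStep
  by_cases hb : (PySem.Str.strip ln == "") = true
  · rw [if_pos hb, if_pos hb]
    cases out with
    | nil => simp
    | cons a tl =>
      have h1 : (a :: tl).reverse = tl.reverse ++ [a] := by simp
      rw [h1, List.getLast?_concat]
      by_cases ha : (PySem.Str.strip a == "") = true
      · simp [ha]
      · simp [ha]
  · rw [if_neg hb, if_neg hb]; simp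

theorem norm_rev (xs : List String) : ∀ out : List String,
    xs.foldl pvNormStepB out.reverse = (xs.foldl pvConsStep out).reverse := by
  induction xs with
  | nil => intro out; rfl
  | cons x xs ih =>
    intro out
    rw [List.foldl_cons, List.foldl_cons, normStep_rev, ih]

theorem alt_norm (doc : List String) :
    (doc.reverse.foldl pvNormStepB []).reverse = pvN doc := by
  have h0 : ([] : List String) = ([] : List String).reverse := rfl
  rw [h0, norm_rev, List.reverse_reverse, List.foldl_reverse]
  rfl

-- pass-1 characterization: filtered survivors reversed, and the tail length below the first H1
theorem pass1_eq (link : String) (lines : List String) :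
    pvPass1B link lines =
      ((lines.filter (fun ln => !pvIsLinkB link ln)).reverse,
       ((lines.filter (fun ln => !pvIsLinkB link ln)).findIdx?
          (fun ln => PySem.Str.startswith (PySem.Str.strip ln) "# ")).map
         (fun j => (lines.filter (fun ln => !pvIsLinkB link ln)).length - (j + 1))) := by
  unfold pvPass1B
  rw [List.foldl_reverse]
  induction lines with
  | nil => rfl
  | cons ln tl ih =>
    rw [List.foldr_cons, ih, List.filter_cons]
    by_cases hl : pvIsLinkB link ln = true
    · simp only [hl, if_true, Bool.not_true, Bool.false_eq_true, if_false]
    · have hl' : pvIsLinkB link ln = false := by simpa using hl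
      rw [hl']
      simp only [Bool.not_false, if_true, Bool.false_eq_true, if_false, List.findIdx?_cons]
      by_cases hh : PySem.Str.startswith (PySem.Str.strip ln) "# " = true
      · rw [if_pos hh, if_pos hh]
        simp
      · have hh' : PySem.Str.startswith (PySem.Str.strip ln) "# " = false := by simpa using hh
        rw [if_neg (by simpa using hh'), if_neg (by simpa using hh')]
        cases hf : (tl.filter (fun ln => !pvIsLinkB link ln)).findIdx?
            (fun ln => PySem.Str.startswith (PySem.Str.strip ln) "# ") with
        | none => simp
        | some j =>
          simp only [Option.map_some, Prod.mk.injEq, List.length_cons]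
          refine ⟨by simp, ?_⟩
          congr 1
          omega
theorem findA_eq (l : List String) : ∀ (i : Nat),
    pvFindH1A l (i : Int) =
      (match l.findIdx? (fun ln => PySem.Str.startswith (PySem.Str.strip ln) "# ") with
       | some j => ((i + j : Nat) : Int)
       | none => -1) := by
  induction l with
  | nil => intro i; simp [pvFindH1A]
  | cons ln rest ih =>
    intro i
    cases hb : PySem.Str.startswith (PySem.Str.strip ln) "# " with
    | true =>
      simp only [pvFindH1A, List.findIdx?_cons, hb, if_true]
      norm_num
    | false =>
      simp only [pvFindH1A, List.findIdx?_cons, hb, Bool.false_eq_true, if_false]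
      have hcast : ((i : Int) + 1) = ((i + 1 : Nat) : Int) := by push_cast; ring
      rw [hcast, ih (i + 1)]
      cases hf : rest.findIdx? (fun ln => PySem.Str.startswith (PySem.Str.strip ln) "# ") with
      | none => simp
      | some j => simp; ring

theorem stripA_eq (link : String) (l : List String) : ∀ (acc : List String),
    l.foldl (fun acc ln =>
      let s := PySem.Str.strip ln
      if s == link || s == "> " ++ link then acc else acc ++ [ln]) acc
    = acc ++ l.filter (fun ln => !pvIsLinkB link ln) := by
  induction l with
  | nil => intro acc; simp
  | cons ln rest ih =>
    intro acc
    simp only [List.foldl_cons, List.filter_cons]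
    by_cases h : (PySem.Str.strip ln == link || PySem.Str.strip ln == "> " ++ link) = true
    · simp only [pvIsLinkB, h, if_true, Bool.not_true, Bool.false_eq_true, if_false, ih]
    · have h' : (PySem.Str.strip ln == link || PySem.Str.strip ln == "> " ++ link) = false := by
        simpa using h
      simp only [pvIsLinkB, h', Bool.false_eq_true, if_false, Bool.not_false, if_true, ih,
        List.append_assoc, List.singleton_append]

theorem main_eq (lines : List String) (link_line : String) :
    ensure_top_link lines link_line = ensure_top_link_alt lines link_line := by
  unfold ensure_top_link ensure_top_link_alt
  rw [stripA_eq, List.nil_append, pass1_eq]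
  simp only []
  set kept := lines.filter (fun ln => !pvIsLinkB link_line ln) with hkept
  rw [show (0 : Int) = ((0 : Nat) : Int) from rfl, findA_eq]
  cases hf : kept.findIdx? (fun ln => PySem.Str.startswith (PySem.Str.strip ln) "# ") with
  | none =>
    rw [if_pos (by norm_num)]
    simp only [Option.map_none]
    rw [alt_norm, pvN_eq, cleanupA_eq, List.reverse_reverse]
  | some j =>
    have hjlt : j < kept.length := by
      rw [List.findIdx?_eq_some_iff_findIdx_eq] at hf; exact hf.1
    simp only [Nat.zero_add, Option.map_some]
    have h0 : ¬(((j : Nat) : Int) < ((0 : Nat) : Int)) := by omega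
    obtain ⟨t, rest, hsplit, htlen⟩ : ∃ t rest, kept = t ++ rest ∧ t.length = j + 1 :=
      ⟨kept.take (j + 1), kept.drop (j + 1), (List.take_append_drop _ _).symm, by
        simp [List.length_take]; omega⟩
    have hdrop : ((t ++ rest).reverse.drop ((t ++ rest).length - (j + 1))).reverse = t := by
      rw [List.reverse_append,
        show (t ++ rest).length - (j + 1) = rest.reverse.length by simp [htlen],
        List.drop_left, List.reverse_reverse]
    have htake : ((t ++ rest).reverse.take ((t ++ rest).length - (j + 1))).reverse = rest := by
      rw [List.reverse_append,
        show (t ++ rest).length - (j + 1) = rest.reverse.length by simp [htlen],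
        List.take_left, List.reverse_reverse]
    rw [hsplit]
    have hcast1 : ((j : Nat) : Int) + 1 = (((j + 1 : Nat)) : Int) := by push_cast; ring
    rw [if_neg h0, hcast1, hdrop, htake]
    cases rest with
    | nil =>
      dsimp only
      simp only [List.append_nil, Bool.false_eq_true, if_false]
      split_ifs with hg1 hg2 hg2
      · exact absurd hg1.1 (by push_cast; omega)
      · exact absurd hg1.1 (by push_cast; omega)
      · exfalso
        have := hg2.1
        rw [PySem.List.insert_natCast t (j + 1) link_line (by omega)] at this
        simp [htlen] at this
      · rw [PySem.List.insert_natCast t (j + 1) link_line (by omega),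
          List.take_of_length_le (by omega), List.drop_of_length_le (by omega)]
        rw [alt_norm, pvN_eq, cleanupA_eq]
    | cons r0 rs =>
      dsimp only
      have hget1 : PySem.List.pyGet? (t ++ r0 :: rs) (((j + 1 : Nat)) : Int) = some r0 := by
        rw [show (((j + 1 : Nat)) : Int) = ((t.length : Nat) : Int) by rw [htlen]]
        exact PySem.List.pyGet?_append_length t rs r0
      have hins1 : PySem.List.insert (t ++ r0 :: rs) (((j + 1 : Nat)) : Int) link_line
          = (t ++ [link_line]) ++ r0 :: rs := by
        rw [PySem.List.insert_natCast (t ++ r0 :: rs) (j + 1) link_line (by simp; omega),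
          List.take_left' htlen, List.drop_left' htlen]
        simp
      have hlen2 : (t ++ [""]).length = j + 2 := by simp [htlen]
      have hins0 : PySem.List.insert (t ++ r0 :: rs) (((j + 1 : Nat)) : Int) ""
          = (t ++ [""]) ++ r0 :: rs := by
        rw [PySem.List.insert_natCast (t ++ r0 :: rs) (j + 1) "" (by simp; omega),
          List.take_left' htlen, List.drop_left' htlen]
        simp
      by_cases hblank : PySem.Str.strip r0 = ""
      · conv_rhs => rw [if_neg (show ¬((!(PySem.Str.strip r0 == "")) = true) by simp [hblank])]
        split_ifs with hg1 hg2 hg2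
        · exact absurd (by rw [hget1] at hg1; simpa using hg1.2) (by simp [hblank])
        · exact absurd (by rw [hget1] at hg1; simpa using hg1.2) (by simp [hblank])
        · exfalso
          dsimp at hg2
          rw [hcast1, hins1] at hg2
          rw [show (((j + 1 : Nat)) : Int) + 1 = (((t ++ [link_line]).length : Nat) : Int) by
                simp [htlen],
            PySem.List.pyGet?_append_length] at hg2
          exact hg2.2 (by simpa using hblank)
        · rw [hins1]
          rw [alt_norm, pvN_eq, cleanupA_eq]
      · conv_rhs => rw [if_pos (show (!(PySem.Str.strip r0 == "")) = true by simp [hblank])]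
        split_ifs with hg1 hg2 hg2
        · rw [hins0,
            show ((((j + 1 : Nat)) : Int) + 1) = (((j + 2 : Nat)) : Int) by push_cast; ring,
            PySem.List.insert_natCast ((t ++ [""]) ++ r0 :: rs) (j + 2) link_line (by simp [htlen]; omega),
            List.take_left' hlen2, List.drop_left' hlen2,
            show ((((j + 2 : Nat)) : Int) + 1) = (((j + 3 : Nat)) : Int) by push_cast; ring,
            show (t ++ [""]) ++ link_line :: r0 :: rs = ((t ++ [""]) ++ [link_line]) ++ r0 :: rs by simp]
          have hlen3 : ((t ++ [""]) ++ [link_line]).length = j + 3 := by simp [htlen]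
          rw [PySem.List.insert_natCast (((t ++ [""]) ++ [link_line]) ++ r0 :: rs) (j + 3) "" (by simp [htlen]; omega),
            List.take_left' hlen3, List.drop_left' hlen3]
          rw [alt_norm, pvN_eq, cleanupA_eq]
          simp
        · exfalso
          apply hg2
          dsimp only
          rw [hins0,
            show ((((j + 1 : Nat)) : Int) + 1) = (((j + 2 : Nat)) : Int) by push_cast; ring,
            PySem.List.insert_natCast ((t ++ [""]) ++ r0 :: rs) (j + 2) link_line (by simp [htlen]; omega),
            List.take_left' hlen2, List.drop_left' hlen2]
          constructor
          · simp only [List.length_append, List.length_cons, List.length_nil, htlen]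
            push_cast
            omega
          · rw [show ((((j + 2 : Nat)) : Int) + 1) = ((((t ++ [""]) ++ [link_line]).length : Nat) : Int) by
                simp [htlen]; omega,
              show (t ++ [""]) ++ link_line :: r0 :: rs = ((t ++ [""]) ++ [link_line]) ++ r0 :: rs by simp,
              PySem.List.pyGet?_append_length]
            simpa using hblank
        · exact absurd ⟨by simp [htlen], by rw [hget1]; simpa using hblank⟩ hg1
        · exact absurd ⟨by simp [htlen], by rw [hget1]; simpa using hblank⟩ hg1

-- ===== VERDICT (by name: the statement is the Claim_ definition above) =====
theorem ensure_top_link_spec : Claim_equal_ensure_top_link := by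
  intro lines link_line _
  unfold Spec_ensure_top_link
  exact main_eq lines link_line
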